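-- pv_equiv track=rewrite | github.com/Shital16-hub/Google-STT-Google-TTS | app/tools/monitoring_tools.py | _calculate_overall_trend
-- ===== SOURCE A (Python) =====
-- from typing import Dict, List, Any, Optional, Union, Callable
--
-- def _calculate_overall_trend(trend_analysis: Dict[str, Any]) -> str:
--     """Calculate overall system health trend"""
--
--     improving_count = sum(1 for ta in trend_analysis.values() if ta["trend_direction"] == "improving")
--     degrading_count = sum(1 for ta in trend_analysis.values() if ta["trend_direction"] == "degrading")
--
--     if improving_count > degrading_count:
--         return "improving"
--     elif degrading_count > improving_count:
--         return "degrading"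
--     else:
--         return "stable"
-- ===== SOURCE B (Python) =====
-- def _calculate_overall_trend(trend_analysis):
--     """Calculate overall system health trend"""
--     # Pair-cancellation: opposite trends annihilate on a stack; the leftover
--     # label (if any) is the overall trend. The stack only ever holds copies of
--     # one label, so its size is |#improving - #degrading|.
--     stack = []
--     for ta in trend_analysis.values():
--         d = ta["trend_direction"]
--         if d not in ("improving", "degrading"):
--             continue
--         if stack and stack[-1] != d:
--             stack.pop()
--         else:
--             stack.append(d)
--     return stack[-1] if stack else "stable"
-- ===== Notes on version B (the rewrite author's own statement) =====
-- stated objective: alternative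
-- what changed: Replaces the two counting scans and count comparison with a pair-cancellation stack: opposite trend labels annihilate each other, and the surviving label (or an empty stack) decides the result.
import Mathlib
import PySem

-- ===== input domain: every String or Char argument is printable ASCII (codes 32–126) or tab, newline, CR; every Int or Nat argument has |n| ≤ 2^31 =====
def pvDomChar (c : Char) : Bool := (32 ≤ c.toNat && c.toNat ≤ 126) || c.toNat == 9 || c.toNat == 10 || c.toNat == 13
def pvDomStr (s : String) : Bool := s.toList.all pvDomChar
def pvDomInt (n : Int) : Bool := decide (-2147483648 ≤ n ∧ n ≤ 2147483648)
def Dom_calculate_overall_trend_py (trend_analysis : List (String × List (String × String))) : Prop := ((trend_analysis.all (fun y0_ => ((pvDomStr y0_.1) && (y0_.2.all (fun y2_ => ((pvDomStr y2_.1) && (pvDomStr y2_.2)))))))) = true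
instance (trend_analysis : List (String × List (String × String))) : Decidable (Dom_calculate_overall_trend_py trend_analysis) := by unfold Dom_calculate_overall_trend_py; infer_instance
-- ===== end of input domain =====

-- B replaces A's two counting scans with a pair-cancellation stack (opposite labels annihilate; the survivor decides).

-- ===== PORT A =====
-- ta["trend_direction"]: dict lookup; Pre_ guarantees the key is present (getD "" is never reached inside Pre_)
def pvTrendDir (ta : List (String × String)) : String :=
  ((PySem.Dict.ofList ta).get? "trend_direction").getD ""

def calculate_overall_trend_py (trend_analysis : List (String × List (String × String))) : String :=
  let vals := (PySem.Dict.ofList trend_analysis).values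
  let improving_count := (vals.map (fun ta => if pvTrendDir ta == "improving" then (1 : Int) else 0)).sum
  let degrading_count := (vals.map (fun ta => if pvTrendDir ta == "degrading" then (1 : Int) else 0)).sum
  if improving_count > degrading_count then "improving"
  else if degrading_count > improving_count then "degrading"
  else "stable"

-- ===== PORT B =====
-- one loop step of Source B: skip irrelevant labels, cancel against the stack top, else push
def pvStep (stack : List String) (ta : List (String × String)) : List String :=
  let d := pvTrendDir ta
  if !(d == "improving" || d == "degrading") then stack
  else if !stack.isEmpty && stack.getLast? != some d then stack.dropLast
  else stack ++ [d]

def calculate_overall_trend_py_alt (trend_analysis : List (String × List (String × String))) : String :=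
  let stack := (PySem.Dict.ofList trend_analysis).values.foldl pvStep []
  match stack.getLast? with
  | some s => s
  | none => "stable"

-- ===== PRECONDITION & SPEC =====
-- Pre_ excludes exactly the inputs on which the Python A raises KeyError: some value dict lacks the key "trend_direction".
def Pre_calculate_overall_trend_py (trend_analysis : List (String × List (String × String))) : Prop :=
  ((PySem.Dict.ofList trend_analysis).values.all
    (fun ta => (PySem.Dict.ofList ta).contains "trend_direction")) = true
instance (trend_analysis : List (String × List (String × String))) : Decidable (Pre_calculate_overall_trend_py trend_analysis) := by unfold Pre_calculate_overall_trend_py; infer_instance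
def pvWitness_calculate_overall_trend_py : (List (String × List (String × String))) :=
  [("cpu", [("trend_direction", "improving")]), ("mem", [("trend_direction", "stable")])]

def Spec_calculate_overall_trend_py (trend_analysis : List (String × List (String × String))) (out : String) : Prop := out = calculate_overall_trend_py_alt trend_analysis
instance (trend_analysis : List (String × List (String × String))) (out : String) : Decidable (Spec_calculate_overall_trend_py trend_analysis out) := by unfold Spec_calculate_overall_trend_py; infer_instance

-- ===== CLAIM (what is proved, stated in full; the proofs are below) =====
def Claim_equal_calculate_overall_trend_py : Prop := ∀ (trend_analysis : List (String × List (String × String))), Dom_calculate_overall_trend_py trend_analysis → Pre_calculate_overall_trend_py trend_analysis → Spec_calculate_overall_trend_py trend_analysis (calculate_overall_trend_py trend_analysis)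

-- ===== LEMMAS AND PROOFS =====
-- canonical form of B's stack: |balance| copies of the sign's label
def reprStack (b : Int) : List String :=
  if b > 0 then List.replicate b.toNat "improving"
  else if b < 0 then List.replicate (-b).toNat "degrading"
  else []

lemma getLast?_replicate (n : Nat) (x : String) :
    (List.replicate n x).getLast? = if n = 0 then none else some x := by
  induction n with
  | zero => rfl
  | succ m ih =>
    cases m with
    | zero => rfl
    | succ k =>
      rw [List.replicate_succ, List.getLast?_cons]
      simp only [ih]
      simp

lemma repr_neg (b : Int) (hb : b < 0) :
    reprStack b = List.replicate (-b).toNat "degrading" := by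
  unfold reprStack; rw [if_neg (by omega), if_pos hb]

lemma repr_pos (b : Int) (hb : b > 0) :
    reprStack b = List.replicate b.toNat "improving" := by
  unfold reprStack; rw [if_pos hb]

lemma step_imp (b : Int) (ta : List (String × String))
    (h1 : pvTrendDir ta = "improving") :
    pvStep (reprStack b) ta = reprStack (b + 1) := by
  unfold pvStep
  rcases lt_trichotomy b 0 with hb | hb | hb
  · obtain ⟨m, hm⟩ : ∃ m, (-b).toNat = m + 1 := ⟨(-b).toNat - 1, by omega⟩
    rcases lt_trichotomy (b + 1) 0 with hb1 | hb1 | hb1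
    · rw [repr_neg b hb, repr_neg (b + 1) (by omega)]
      simp [h1, hm, getLast?_replicate]
      omega
    · have hbz : b = -1 := by omega
      subst hbz
      simp [h1, reprStack, List.replicate_succ]
    · omega
  · subst hb
    simp [h1, reprStack]
  · rw [repr_pos b hb, repr_pos (b + 1) (by omega)]
    obtain ⟨m, hm⟩ : ∃ m, b.toNat = m + 1 := ⟨b.toNat - 1, by omega⟩
    simp [h1, hm, getLast?_replicate,
      show (b + 1).toNat = (m + 1) + 1 from by omega]
    simp [List.replicate_succ', List.append_assoc]

lemma step_deg (b : Int) (ta : List (String × String))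
    (h2 : pvTrendDir ta = "degrading") :
    pvStep (reprStack b) ta = reprStack (b - 1) := by
  unfold pvStep
  rcases lt_trichotomy b 0 with hb | hb | hb
  · rw [repr_neg b hb, repr_neg (b - 1) (by omega)]
    obtain ⟨m, hm⟩ : ∃ m, (-b).toNat = m + 1 := ⟨(-b).toNat - 1, by omega⟩
    simp [h2, hm, getLast?_replicate]
    simp [show ((1:Int) - b).toNat = (m + 1) + 1 from by omega,
      List.replicate_succ', List.append_assoc]
  · subst hb
    simp [h2, reprStack]
  · obtain ⟨m, hm⟩ : ∃ m, b.toNat = m + 1 := ⟨b.toNat - 1, by omega⟩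
    rcases lt_trichotomy (b - 1) 0 with hb1 | hb1 | hb1
    · omega
    · have hbz : b = 1 := by omega
      subst hbz
      simp [h2, reprStack, List.replicate_succ]
    · rw [repr_pos b hb, repr_pos (b - 1) (by omega)]
      simp [h2, hm, getLast?_replicate,
        show (b - 1).toNat = m from by omega]

lemma step_other (b : Int) (ta : List (String × String))
    (h1 : ¬ pvTrendDir ta = "improving") (h2 : ¬ pvTrendDir ta = "degrading") :
    pvStep (reprStack b) ta = reprStack b := by
  unfold pvStep
  simp [h1, h2]

lemma step_repr (b : Int) (ta : List (String × String)) :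
    pvStep (reprStack b) ta =
      reprStack (b + (if pvTrendDir ta == "improving" then (1 : Int) else 0)
                   - (if pvTrendDir ta == "degrading" then (1 : Int) else 0)) := by
  by_cases h1 : pvTrendDir ta = "improving"
  · rw [step_imp b ta h1]
    congr 1
    simp [h1]
  · by_cases h2 : pvTrendDir ta = "degrading"
    · rw [step_deg b ta h2]
      congr 1
      simp [h2]
    · rw [step_other b ta h1 h2]
      congr 1
      simp [h1, h2]

lemma foldl_repr (l : List (List (String × String))) (b : Int) :
    l.foldl pvStep (reprStack b)
      = reprStack (b + (l.map (fun ta => if pvTrendDir ta == "improving" then (1 : Int) else 0)).sum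
                     - (l.map (fun ta => if pvTrendDir ta == "degrading" then (1 : Int) else 0)).sum) := by
  induction l generalizing b with
  | nil => simp
  | cons hd tl ih =>
    simp only [List.foldl_cons, List.map_cons, List.sum_cons]
    rw [step_repr, ih]
    congr 1
    ring

lemma final_branch (I D : Int) :
    (if I > D then "improving" else if D > I then "degrading" else "stable")
      = (match (reprStack (0 + I - D)).getLast? with
         | some s => s
         | none => "stable") := by
  rcases lt_trichotomy I D with h | h | h
  · rw [repr_neg (0 + I - D) (by omega)]
    rw [getLast?_replicate]
    rw [if_neg (by omega : ¬ (-(0 + I - D)).toNat = 0)]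
    rw [if_neg (by omega), if_pos (by omega)]
  · subst h
    simp [reprStack]
  · rw [repr_pos (0 + I - D) (by omega)]
    rw [getLast?_replicate]
    rw [if_neg (by omega : ¬ (0 + I - D).toNat = 0)]
    rw [if_pos (by omega)]

-- ===== VERDICT (by name: the statement is the Claim_ definition above) =====
theorem calculate_overall_trend_py_spec : Claim_equal_calculate_overall_trend_py := by
  intro l _ _
  unfold Spec_calculate_overall_trend_py calculate_overall_trend_py calculate_overall_trend_py_alt
  rw [show (([] : List String)) = reprStack 0 from by simp [reprStack], foldl_repr]
  exact final_branch _ _
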